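-- pv_equiv track=rewrite | github.com/zoelsner/farmtopeople | server/services/meal_generator.py | has_snack_potential
-- ===== SOURCE A (Python) =====
-- from typing import Dict, Any, List, Optional
--
-- def has_snack_potential(ingredients: Dict[str, List[str]]) -> bool:
--     """
--     Determine if remaining ingredients can make meaningful snacks.
--
--     Args:
--         ingredients: Dict with proteins, vegetables, other_items
--
--     Returns:
--         True if snack-worthy ingredients remain
--     """
--     # Check for snack-friendly items
--     snack_indicators = [
--         'egg',        # deviled eggs, egg salad
--         'avocado',    # avocado toast, guacamole
--         'tomato',     # bruschetta, salsa
--         'cheese',     # cheese board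
--         'fruit',      # fruit salad
--         'berry',      # mixed berries
--         'nut'         # trail mix
--     ]
--
--     all_ingredients = ingredients.get('proteins', []) + ingredients.get('vegetables', []) + ingredients.get('other_items', [])
--
--     for item in all_ingredients:
--         item_lower = item.lower()
--         if any(snack_ingredient in item_lower for snack_ingredient in snack_indicators):
--             return True
--
--     return False
-- ===== SOURCE B (Python) =====
-- SNACK_INDICATORS = ('egg', 'avocado', 'tomato', 'cheese', 'fruit', 'berry', 'nut')
--
--
-- def _snack_text(ingredients):
--     """Collect every ingredient from the three categories, lowercased,
--     into one newline-separated text ('\n' occurs in no indicator)."""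
--     parts = []
--     for key in ('proteins', 'vegetables', 'other_items'):
--         for item in ingredients.get(key, []):
--             parts.append(item.lower())
--     return '\n'.join(parts)
--
--
-- def has_snack_potential(ingredients):
--     """
--     Determine if remaining ingredients can make meaningful snacks.
--
--     Staged re-implementation: first build one lowercased text index of all
--     ingredients (folding over the category keys), then scan the fixed
--     indicator tuple once for a substring hit.
--     """
--     text = _snack_text(ingredients)
--     for indicator in SNACK_INDICATORS:
--         if indicator in text:
--             return True
--     return False
-- ===== Notes on version B (the rewrite author's own statement) =====
-- stated objective: idiomatic
-- what changed: A loops over the concatenated ingredient list and runs an inner any over the indicators per item; B first folds over the category keys to build one lowercased newline-joined text index, then does a single early-exit scan over the fixed indicator tuple against that text.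
import Mathlib
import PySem

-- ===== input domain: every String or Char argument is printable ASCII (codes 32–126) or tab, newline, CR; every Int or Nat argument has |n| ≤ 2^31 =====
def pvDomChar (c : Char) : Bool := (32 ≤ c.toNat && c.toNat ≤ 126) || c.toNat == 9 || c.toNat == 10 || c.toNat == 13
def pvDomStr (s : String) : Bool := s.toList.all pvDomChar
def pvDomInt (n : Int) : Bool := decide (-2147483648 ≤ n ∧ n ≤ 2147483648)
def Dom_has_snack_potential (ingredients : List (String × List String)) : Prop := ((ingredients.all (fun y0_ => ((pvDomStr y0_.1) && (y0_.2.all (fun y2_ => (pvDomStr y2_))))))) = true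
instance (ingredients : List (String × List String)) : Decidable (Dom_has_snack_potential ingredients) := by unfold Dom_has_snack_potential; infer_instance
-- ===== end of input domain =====

-- B stages the work: fold over the category keys to build one lowercased newline-joined
-- text index, then a single early-exit scan over the indicator list (objective: idiomatic).

-- ===== PORT A =====
def has_snack_potential (ingredients : List (String × List String)) : Bool :=
  let snack_indicators : List String :=
    ["egg", "avocado", "tomato", "cheese", "fruit", "berry", "nut"]
  let d := PySem.Dict.mk ingredients
  let all_ingredients := d.getD "proteins" [] ++ d.getD "vegetables" [] ++ d.getD "other_items" []
  -- the for-loop with early 'return True' and final 'return False' is List.any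
  all_ingredients.any (fun item =>
    let item_lower := PySem.Str.lower item
    snack_indicators.any (fun snack_ingredient => PySem.Str.isIn snack_ingredient item_lower))

-- ===== PORT B =====
-- _snack_text: append each category's items, lowercased, then join with '\n'
def pvSnackText (ingredients : List (String × List String)) : List Char :=
  let d := PySem.Dict.mk ingredients
  let parts :=
    (["proteins", "vegetables", "other_items"]).foldl
      (fun acc key => acc ++ (d.getD key []).map (fun item => PySem.Chars.lower item.toList)) []
  PySem.Chars.join ['\n'] parts

-- the early-exit for-loop over the indicator tuple
def pvScanIndicators (text : List Char) : List String → Bool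
  | [] => false
  | indicator :: rest =>
      if PySem.Chars.isIn indicator.toList text then true else pvScanIndicators text rest

def has_snack_potential_alt (ingredients : List (String × List String)) : Bool :=
  pvScanIndicators (pvSnackText ingredients)
    ["egg", "avocado", "tomato", "cheese", "fruit", "berry", "nut"]

-- ===== PRECONDITION & SPEC =====
def Spec_has_snack_potential (ingredients : List (String × List String)) (out : Bool) : Prop := out = has_snack_potential_alt ingredients
instance (ingredients : List (String × List String)) (out : Bool) : Decidable (Spec_has_snack_potential ingredients out) := by unfold Spec_has_snack_potential; infer_instance

-- ===== CLAIM (what is proved, stated in full; the proofs are below) =====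
def Claim_equal_has_snack_potential : Prop := ∀ (ingredients : List (String × List String)), Dom_has_snack_potential ingredients → Spec_has_snack_potential ingredients (has_snack_potential ingredients)

-- ===== LEMMAS AND PROOFS =====

-- the recursive scan is an any over the indicator list
theorem pv_scan_eq_any (text : List Char) (inds : List String) :
    pvScanIndicators text inds = inds.any (fun ind => PySem.Chars.isIn ind.toList text) := by
  induction inds with
  | nil => rfl
  | cons i rest ih => simp [pvScanIndicators, ih]

-- a prefix of a ++ c :: b that avoids c is a prefix of a
theorem pv_prefix_split {ind a b : List Char} {c : Char} (hc : c ∉ ind)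
    (h : ind <+: a ++ c :: b) : ind <+: a := by
  have hlen : ind.length ≤ a.length := by
    by_contra hcon
    have hlt : a.length < ind.length := Nat.lt_of_not_le hcon
    have h1 : ind[a.length]'hlt = (a ++ c :: b)[a.length]'(by simp) := h.getElem hlt
    have h2 : (a ++ c :: b)[a.length]'(by simp) = c := by
      simp [List.getElem_append_right]
    exact hc ((h1.trans h2) ▸ List.getElem_mem hlt)
  obtain ⟨t, ht⟩ := h
  have h3 : List.take ind.length (a ++ c :: b) = ind := by
    rw [← ht]; exact List.take_left' rfl
  rw [List.take_append_of_le_length hlen] at h3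
  exact h3 ▸ List.take_prefix _ a

-- a c-free infix of a ++ c :: b lies in a or in b
theorem pv_infix_middle {ind : List Char} {c : Char} (hc : c ∉ ind) :
    ∀ a b : List Char, (ind <:+: a ++ c :: b ↔ ind <:+: a ∨ ind <:+: b) := by
  intro a
  induction a with
  | nil =>
    intro b
    rw [List.nil_append, List.infix_cons_iff]
    constructor
    · rintro (hp | hi)
      · cases ind with
        | nil => exact Or.inl List.nil_infix
        | cons x xs =>
          rw [List.cons_prefix_cons] at hp
          exact absurd (hp.1 ▸ List.mem_cons_self) hc
      · exact Or.inr hi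
    · rintro (hi | hi)
      · rw [List.infix_nil] at hi
        exact Or.inl (hi ▸ List.nil_prefix)
      · exact Or.inr hi
  | cons x a' ih =>
    intro b
    rw [List.cons_append, List.infix_cons_iff, ih]
    constructor
    · rintro (hp | hi | hi)
      · exact Or.inl (pv_prefix_split (a := x :: a') hc (by simpa using hp)).isInfix
      · exact Or.inl (hi.trans (List.suffix_cons x a').isInfix)
      · exact Or.inr hi
    · rintro (hi | hi)
      · rw [List.infix_cons_iff] at hi
        rcases hi with hp | hi
        · exact Or.inl (hp.trans ⟨_, rfl⟩)
        · exact Or.inr (Or.inl hi)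
      · exact Or.inr (Or.inr hi)

-- a nonempty c-free pattern is an infix of the c-joined list iff it is an infix of a part
theorem pv_infix_join {ind : List Char} {c : Char} (hc : c ∉ ind) (hne : ind ≠ []) :
    ∀ xs : List (List Char),
      (ind <:+: PySem.Chars.join [c] xs ↔ ∃ x ∈ xs, ind <:+: x) := by
  intro xs
  induction xs with
  | nil => simp [PySem.Chars.join_nil, List.infix_nil, hne]
  | cons x rest ih =>
    cases rest with
    | nil => simp [PySem.Chars.join_singleton]
    | cons y rest' =>
      rw [PySem.Chars.join_cons_cons, List.append_assoc, List.singleton_append,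
        pv_infix_middle hc, ih]
      simp

-- the B-side fold over keys produces the map of lowered items over A's concatenation
theorem pv_parts_eq (d : PySem.Dict String (List String)) :
    (["proteins", "vegetables", "other_items"]).foldl
      (fun acc key => acc ++ (d.getD key []).map (fun item => PySem.Chars.lower item.toList)) []
    = (d.getD "proteins" [] ++ d.getD "vegetables" [] ++ d.getD "other_items" []).map
        (fun item => PySem.Chars.lower item.toList) := by
  simp [List.foldl]

-- A's any-over-items-then-indicators equals one indicator scan over the joined lowered text
theorem pv_any_eq (inds : List String)
    (h : ∀ ind ∈ inds, ind.toList ≠ [] ∧ '\n' ∉ ind.toList) (all : List String) :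
    (all.any fun item => inds.any fun ind => PySem.Str.isIn ind (PySem.Str.lower item))
    = (inds.any fun ind => PySem.Chars.isIn ind.toList
        (PySem.Chars.join ['\n'] (all.map (fun item => PySem.Chars.lower item.toList)))) := by
  rw [Bool.eq_iff_iff]
  simp only [List.any_eq_true, PySem.Str.isIn, PySem.Chars.isIn_iff_infix,
    PySem.Str.toList_lower]
  constructor
  · rintro ⟨item, hitem, ind, hind, hinf⟩
    refine ⟨ind, hind, (pv_infix_join (h ind hind).2 (h ind hind).1 _).mpr ?_⟩
    exact ⟨PySem.Chars.lower item.toList, List.mem_map_of_mem hitem, hinf⟩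
  · rintro ⟨ind, hind, hinf⟩
    obtain ⟨y, hy, hyinf⟩ := (pv_infix_join (h ind hind).2 (h ind hind).1 _).mp hinf
    simp only [List.mem_map] at hy
    obtain ⟨item, hitem, rfl⟩ := hy
    exact ⟨item, hitem, ind, hind, hyinf⟩

-- ===== VERDICT (by name: the statement is the Claim_ definition above) =====
theorem has_snack_potential_spec : Claim_equal_has_snack_potential := by
  intro ingredients _
  show has_snack_potential ingredients = has_snack_potential_alt ingredients
  simp only [has_snack_potential, has_snack_potential_alt, pvSnackText]
  rw [pv_scan_eq_any, pv_parts_eq]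
  exact pv_any_eq _ (by decide) _
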